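-- pv_equiv track=rewrite | github.com/gabriel-tadeu-gt/gabriel-tadeu-gt | mc102/lab8.py | avaliar_algebra
-- ===== SOURCE A (Python) =====
-- def avaliar_algebra(lista):
--     '''Avalia o valor de uma expressão puramente algébrica, sem nenhum tipo de comparação. É sempre executada primeiro para eliminar as
--     operações mais básicas e - nas comparações - trabalhar apenas com números. Retorna uma lista com todos os valores das expressões.
--         Parâmetro: lista ---- é uma lista com as expressões a serem calculadas. Separa-se cada expressão da outra (quando há uma comparação entre elas)
--                               por meio de um 'x', que também indica o momento em que uma expressão acaba.
--     '''
--     valor = int(lista[0])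
--     valores_expressoes = []
--     for i in range(len(lista)):
--         if lista[i] == '+':
--             valor += int(lista[i + 1])
--         if lista[i] == '-':
--             valor -= int(lista[i + 1])
--         if lista[i] == 'x':
--             valores_expressoes.append(int(valor))
--             valor = int(lista[i + 1])
--     valores_expressoes.append(valor)
--     return valores_expressoes
-- ===== SOURCE B (Python) =====
-- def _eval(seg):
--     v = int(seg[0])
--     i = 1
--     while i < len(seg):
--         if seg[i] == '+':
--             v += int(seg[i + 1])
--             i += 2
--         elif seg[i] == '-':
--             v -= int(seg[i + 1])
--             i += 2
--         else:
--             i += 1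
--     return v
--
--
-- def avaliar_algebra(lista):
--     resultados = []
--     seg = []
--     for t in lista:
--         if t == 'x':
--             resultados.append(_eval(seg))
--             seg = []
--         else:
--             seg.append(t)
--     resultados.append(_eval(seg))
--     return resultados
-- ===== Notes on version B (the rewrite author's own statement) =====
-- stated objective: alternative
-- what changed: B splits the token list into 'x'-delimited segments and evaluates each segment independently (initial value + operator/operand scan), instead of A's single indexed loop over the whole list with a running value and i+1 lookahead.
import Mathlib
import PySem

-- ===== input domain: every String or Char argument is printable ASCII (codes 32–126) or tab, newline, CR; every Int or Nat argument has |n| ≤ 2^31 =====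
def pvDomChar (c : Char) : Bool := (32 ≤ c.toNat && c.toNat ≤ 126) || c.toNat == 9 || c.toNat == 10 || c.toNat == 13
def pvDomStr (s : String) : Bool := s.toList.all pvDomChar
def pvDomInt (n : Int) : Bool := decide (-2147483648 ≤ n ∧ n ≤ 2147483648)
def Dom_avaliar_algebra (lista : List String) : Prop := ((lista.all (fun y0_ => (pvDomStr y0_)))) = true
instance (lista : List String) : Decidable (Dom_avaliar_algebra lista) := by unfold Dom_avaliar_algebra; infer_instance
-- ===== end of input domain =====

-- B evaluates the expressions segment by segment (split on 'x') instead of A's single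
-- indexed loop with lookahead; same algorithm cost, different decomposition.

-- int(s), total under Pre_ (which guarantees isSome wherever int() is called)
def pvToInt (s : String) : Int := (PySem.Int.ofStr? s).getD 0

-- ===== PORT A =====
-- the for-loop of A as structural recursion over the remaining tokens;
-- lista[i+1] is the head of the remaining list (IndexError → default, excluded by Pre_)
def avaliarGoA (valor : Int) (vs : List Int) : List String → List Int
  | [] => vs ++ [valor]
  | t :: rest =>
    let v1 := if t = "+" then valor + pvToInt (rest.headD "") else valor
    let v2 := if t = "-" then v1 - pvToInt (rest.headD "") else v1
    if t = "x" then avaliarGoA (pvToInt (rest.headD "")) (vs ++ [v2]) rest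
    else avaliarGoA v2 vs rest

def avaliar_algebra (lista : List String) : List Int :=
  avaliarGoA (pvToInt (lista.headD "")) [] lista

-- ===== PORT B =====
-- the while-loop of B's _eval: consume an operator together with its operand
def evalSegGo : Int → List String → Int
  | v, [] => v
  | v, t :: rest =>
    if t = "+" then evalSegGo (v + pvToInt (rest.headD "")) rest.tail
    else if t = "-" then evalSegGo (v - pvToInt (rest.headD "")) rest.tail
    else evalSegGo v rest
termination_by _ l => l.length
decreasing_by all_goals simp [List.length_tail]; try omega

def evalSeg (seg : List String) : Int := evalSegGo (pvToInt (seg.headD "")) seg.tail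

def avaliar_algebra_alt (lista : List String) : List Int :=
  let p := lista.foldl
    (fun (st : List Int × List String) t =>
      if t = "x" then (st.1 ++ [evalSeg st.2], ([] : List String)) else (st.1, st.2 ++ [t]))
    ([], [])
  p.1 ++ [evalSeg p.2]

-- ===== PRECONDITION & SPEC =====
-- Pre_ = exactly the inputs on which the Python A returns: the first token parses as an
-- int (so the list is nonempty), and every '+', '-' or 'x' token is followed by a token
-- that parses as an int (getD yields "" past the end, which never parses).
def Pre_avaliar_algebra (lista : List String) : Prop :=
  (PySem.Int.ofStr? (lista.headD "")).isSome = true ∧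
  ∀ i, i < lista.length →
    (lista.getD i "" = "+" ∨ lista.getD i "" = "-" ∨ lista.getD i "" = "x") →
    (PySem.Int.ofStr? (lista.getD (i + 1) "")).isSome = true

instance (lista : List String) : Decidable (Pre_avaliar_algebra lista) := by
  unfold Pre_avaliar_algebra; infer_instance

def pvWitness_avaliar_algebra : List String := ["1", "+", "2", "x", "-3", "-", "4"]

def Spec_avaliar_algebra (lista : List String) (out : List Int) : Prop := out = avaliar_algebra_alt lista
instance (lista : List String) (out : List Int) : Decidable (Spec_avaliar_algebra lista out) := by unfold Spec_avaliar_algebra; infer_instance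

-- ===== CLAIM (what is proved, stated in full; the proofs are below) =====
def Claim_equal_avaliar_algebra : Prop := ∀ (lista : List String), Dom_avaliar_algebra lista → Pre_avaliar_algebra lista → Spec_avaliar_algebra lista (avaliar_algebra lista)

-- ===== LEMMAS AND PROOFS =====

-- structural form of the precondition, used by the induction
def pvWF : List String → Prop
  | [] => True
  | t :: rest =>
    ((t = "+" ∨ t = "-" ∨ t = "x") → (PySem.Int.ofStr? (rest.headD "")).isSome = true) ∧ pvWF rest

lemma pvWF_of_forall : ∀ (l : List String),
    (∀ i, i < l.length →
      (l.getD i "" = "+" ∨ l.getD i "" = "-" ∨ l.getD i "" = "x") →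
      (PySem.Int.ofStr? (l.getD (i + 1) "")).isSome = true) → pvWF l := by
  intro l
  induction l with
  | nil => intro _; trivial
  | cons t rest ih =>
    intro h
    constructor
    · intro hop
      have h0 := h 0 (by simp) (by simpa using hop)
      simpa [List.getD, List.headD_eq_head?, List.head?_eq_getElem?] using h0
    · exact ih (fun i hi hop => h (i + 1) (by simpa using Nat.succ_lt_succ hi) (by simpa using hop))

lemma pvParse_not_op {s : String} (h : (PySem.Int.ofStr? s).isSome = true) :
    s ≠ "+" ∧ s ≠ "-" ∧ s ≠ "x" := by
  refine ⟨?_, ?_, ?_⟩ <;> rintro rfl <;> revert h <;> decide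

lemma pvParse_ne_empty {s : String} (h : (PySem.Int.ofStr? s).isSome = true) : s ≠ "" := by
  rintro rfl; revert h; decide

def pvBStep (st : List Int × List String) (t : String) : List Int × List String :=
  if t = "x" then (st.1 ++ [evalSeg st.2], ([] : List String)) else (st.1, st.2 ++ [t])

lemma pvAlt_eq (lista : List String) :
    avaliar_algebra_alt lista =
      (lista.foldl pvBStep ([], [])).1 ++ [evalSeg (lista.foldl pvBStep ([], [])).2] := rfl

-- main invariant lemma: running A's loop from (valor, vs) equals running B's fold from
-- (vs, seg) whenever seg is a nonempty partial segment whose pending evaluation is valor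
lemma pvMain : ∀ (n : Nat) (rest : List String), rest.length ≤ n →
    ∀ (valor : Int) (vs : List Int) (seg : List String), pvWF rest → seg ≠ [] →
    (∀ u, evalSegGo (pvToInt (seg.headD "")) (seg.tail ++ u) = evalSegGo valor u) →
    avaliarGoA valor vs rest =
      (rest.foldl pvBStep (vs, seg)).1 ++ [evalSeg (rest.foldl pvBStep (vs, seg)).2] := by
  intro n
  induction n with
  | zero =>
    intro rest hlen valor vs seg _ hne hinv
    have : rest = [] := List.eq_nil_of_length_eq_zero (Nat.le_zero.mp hlen)
    subst this
    have h0 := hinv []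
    simp [avaliarGoA, evalSeg, List.foldl] at h0 ⊢
    simp [h0, evalSegGo]
  | succ n ih =>
    intro rest hlen valor vs seg hwf hne hinv
    match rest with
    | [] =>
      have h0 := hinv []
      simp [avaliarGoA, evalSeg, List.foldl] at h0 ⊢
      simp [h0, evalSegGo]
    | t :: rest' =>
      obtain ⟨hop, hwf'⟩ := hwf
      obtain ⟨s, hs, hh⟩ : ∃ s, seg = s :: seg.tail ∧ seg.headD "" = s := by
        cases seg with
        | nil => exact absurd rfl hne
        | cons a b => exact ⟨a, rfl, rfl⟩
      by_cases hx : t = "x"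
      · subst hx
        have hparse := hop (Or.inr (Or.inr rfl))
        have hr' : rest' ≠ [] := by
          intro h; rw [h] at hparse; exact absurd rfl (pvParse_ne_empty (by simpa using hparse))
        match rest', hr' with
        | b :: rest'', _ =>
          have hb : (PySem.Int.ofStr? b).isSome = true := by simpa using hparse
          obtain ⟨hb1, hb2, hb3⟩ := pvParse_not_op hb
          obtain ⟨_, hwf''⟩ := hwf'
          -- A: two steps ('x' then the plain token b); B: two fold steps
          have hval : evalSeg seg = valor := by
            have h0 := hinv []
            simpa [evalSeg, hh, evalSegGo] using h0
          have stepA : avaliarGoA valor vs ("x" :: b :: rest'') =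
              avaliarGoA (pvToInt b) (vs ++ [valor]) rest'' := by
            simp [avaliarGoA, hb1, hb2, hb3]
          have stepB : (("x" :: b :: rest'').foldl pvBStep (vs, seg)) =
              (rest''.foldl pvBStep (vs ++ [valor], [b])) := by
            simp [List.foldl, pvBStep, hb3, hval]
          rw [stepA, stepB]
          exact ih rest'' (by simp at hlen; omega) (pvToInt b) (vs ++ [valor]) [b] hwf''
            (by simp) (fun u => by simp)
      · by_cases hp : t = "+"
        · subst hp
          have hparse := hop (Or.inl rfl)
          have hr' : rest' ≠ [] := by
            intro h; rw [h] at hparse; exact absurd rfl (pvParse_ne_empty (by simpa using hparse))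
          match rest', hr' with
          | b :: rest'', _ =>
            have hb : (PySem.Int.ofStr? b).isSome = true := by simpa using hparse
            obtain ⟨hb1, hb2, hb3⟩ := pvParse_not_op hb
            obtain ⟨_, hwf''⟩ := hwf'
            have stepA : avaliarGoA valor vs ("+" :: b :: rest'') =
                avaliarGoA (valor + pvToInt b) vs rest'' := by
              simp [avaliarGoA, hb1, hb2, hb3]
            have stepB : (("+" :: b :: rest'').foldl pvBStep (vs, seg)) =
                (rest''.foldl pvBStep (vs, seg ++ ["+", b])) := by
              simp [List.foldl, pvBStep, hb3]
            rw [stepA, stepB]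
            refine ih rest'' (by simp at hlen; omega) (valor + pvToInt b) vs (seg ++ ["+", b])
              hwf'' (by simp) ?_
            intro u
            rw [hs]
            have : (s :: seg.tail ++ ["+", b]).tail ++ u = seg.tail ++ ("+" :: b :: u) := by simp
            simp only [this]
            rw [show (s :: seg.tail ++ ["+", b]).headD "" = s from rfl] at *
            calc evalSegGo (pvToInt s) (seg.tail ++ ("+" :: b :: u))
                = evalSegGo valor ("+" :: b :: u) := by
                  have := hinv ("+" :: b :: u); rwa [hh] at this
              _ = evalSegGo (valor + pvToInt b) u := by simp [evalSegGo]
        · by_cases hm : t = "-"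
          · subst hm
            have hparse := hop (Or.inr (Or.inl rfl))
            have hr' : rest' ≠ [] := by
              intro h; rw [h] at hparse; exact absurd rfl (pvParse_ne_empty (by simpa using hparse))
            match rest', hr' with
            | b :: rest'', _ =>
              have hb : (PySem.Int.ofStr? b).isSome = true := by simpa using hparse
              obtain ⟨hb1, hb2, hb3⟩ := pvParse_not_op hb
              obtain ⟨_, hwf''⟩ := hwf'
              have stepA : avaliarGoA valor vs ("-" :: b :: rest'') =
                  avaliarGoA (valor - pvToInt b) vs rest'' := by
                simp [avaliarGoA, hb1, hb2, hb3]
              have stepB : (("-" :: b :: rest'').foldl pvBStep (vs, seg)) =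
                  (rest''.foldl pvBStep (vs, seg ++ ["-", b])) := by
                simp [List.foldl, pvBStep, hb3]
              rw [stepA, stepB]
              refine ih rest'' (by simp at hlen; omega) (valor - pvToInt b) vs (seg ++ ["-", b])
                hwf'' (by simp) ?_
              intro u
              rw [hs]
              have : (s :: seg.tail ++ ["-", b]).tail ++ u = seg.tail ++ ("-" :: b :: u) := by simp
              simp only [this]
              calc evalSegGo (pvToInt s) (seg.tail ++ ("-" :: b :: u))
                  = evalSegGo valor ("-" :: b :: u) := by
                    have := hinv ("-" :: b :: u); rwa [hh] at this
                _ = evalSegGo (valor - pvToInt b) u := by simp [evalSegGo]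
          · -- plain token
            have stepA : avaliarGoA valor vs (t :: rest') = avaliarGoA valor vs rest' := by
              simp [avaliarGoA, hx, hp, hm]
            have stepB : ((t :: rest').foldl pvBStep (vs, seg)) =
                (rest'.foldl pvBStep (vs, seg ++ [t])) := by
              simp [List.foldl, pvBStep, hx]
            rw [stepA, stepB]
            refine ih rest' (by simp at hlen; omega) valor vs (seg ++ [t]) hwf' (by simp) ?_
            intro u
            rw [hs]
            have : (s :: seg.tail ++ [t]).tail ++ u = seg.tail ++ (t :: u) := by simp
            simp only [this]
            calc evalSegGo (pvToInt s) (seg.tail ++ (t :: u))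
                = evalSegGo valor (t :: u) := by
                  have := hinv (t :: u); rwa [hh] at this
              _ = evalSegGo valor u := by simp [evalSegGo, hp, hm]

-- ===== VERDICT (by name: the statement is the Claim_ definition above) =====
theorem avaliar_algebra_spec : Claim_equal_avaliar_algebra := by
  intro lista _ hpre
  obtain ⟨hhead, hidx⟩ := hpre
  have hwf : pvWF lista := pvWF_of_forall lista hidx
  unfold Spec_avaliar_algebra
  match lista with
  | [] => exact absurd rfl (pvParse_ne_empty (by simpa using hhead))
  | h :: rest =>
    have hh : (PySem.Int.ofStr? h).isSome = true := by simpa using hhead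
    obtain ⟨h1, h2, h3⟩ := pvParse_not_op hh
    obtain ⟨_, hwf'⟩ := hwf
    have stepA : avaliar_algebra (h :: rest) = avaliarGoA (pvToInt h) [] rest := by
      simp [avaliar_algebra, avaliarGoA, h1, h2, h3]
    have stepB : avaliar_algebra_alt (h :: rest) =
        (rest.foldl pvBStep ([], [h])).1 ++ [evalSeg (rest.foldl pvBStep ([], [h])).2] := by
      rw [pvAlt_eq]
      simp [List.foldl, pvBStep, h3]
    rw [stepA, stepB]
    exact pvMain rest.length rest le_rfl (pvToInt h) [] [h] hwf' (by simp) (fun u => by simp)
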